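-- pv_equiv track=rewrite | github.com/minsoftk/TIL | python/퍼플아이오/필수 테스트/4.더하고 빼기.py | foo
-- ===== SOURCE A (Python) =====
-- def foo(n):
--     # 모든 경우의 수가 "apple"을 return
--     # 100 이상의 숫자는 모든 값이 99를 가지게 됨.
--     # 100 미만의 숫자경우
--     # 과일들의 자릿수를 뺄 경우 모든 경우가 'apple' 을 반환
--     while (n >= 100):
--         arr = []
--         temp = n
--         while (temp > 0):
--             arr.append(temp % 10)
--             temp = temp // 10
--         n -= sum(arr)
--
--         if n == 99:
--             return "apple"
--         elif n <= 98:
--             return "apple"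
-- ===== SOURCE B (Python) =====
-- def foo(n):
--     # Closed form: the loop only gates on n >= 100 (each pass subtracts a
--     # positive digit sum until the value falls below 100, then returns "apple").
--     return "apple" if n >= 100 else None
-- ===== Notes on version B (the rewrite author's own statement) =====
-- stated objective: simpler
-- what changed: Replaced the nested while-loop digit-sum reduction with a direct threshold check returning "apple" iff n >= 100, since every loop exit returns "apple".
import Mathlib
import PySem

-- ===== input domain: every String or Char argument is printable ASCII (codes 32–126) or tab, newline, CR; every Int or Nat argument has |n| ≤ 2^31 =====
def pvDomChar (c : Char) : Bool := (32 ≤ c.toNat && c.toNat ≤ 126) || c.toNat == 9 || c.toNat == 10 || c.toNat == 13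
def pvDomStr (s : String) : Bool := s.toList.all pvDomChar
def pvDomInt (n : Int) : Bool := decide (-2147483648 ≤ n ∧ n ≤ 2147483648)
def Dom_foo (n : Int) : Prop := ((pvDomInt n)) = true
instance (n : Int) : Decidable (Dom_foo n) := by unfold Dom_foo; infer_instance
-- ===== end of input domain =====

-- B replaces A's digit-sum reduction loop with the equivalent closed-form threshold test (simpler).

-- ===== PORT A =====
-- inner while loop: arr.append(temp % 10); temp = temp // 10
-- (fuel-style recursion; fuel temp.toNat is always sufficient since temp strictly decreases)
def fooDigits (fuel : Nat) (temp : Int) (arr : List Int) : List Int :=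
  match fuel with
  | 0 => arr
  | fuel + 1 =>
    if temp > 0 then
      fooDigits fuel (PySem.Int.floordiv temp 10) (arr ++ [PySem.Int.mod temp 10])
    else arr

-- outer while loop (fuel n.toNat suffices: each pass lowers n by its positive digit sum)
def fooLoop (fuel : Nat) (n : Int) : Option String :=
  match fuel with
  | 0 => none
  | fuel + 1 =>
    if n ≥ 100 then
      let arr := fooDigits n.toNat n []
      let n' := n - arr.sum
      if n' = 99 then some "apple"
      else if n' ≤ 98 then some "apple"
      else fooLoop fuel n'
    else none

def foo (n : Int) : Option String := fooLoop n.toNat n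

-- ===== PORT B =====
def foo_alt (n : Int) : Option String :=
  if n ≥ 100 then some "apple" else none

-- ===== PRECONDITION & SPEC =====
def Spec_foo (n : Int) (out : Option String) : Prop := out = foo_alt n
instance (n : Int) (out : Option String) : Decidable (Spec_foo n out) := by unfold Spec_foo; infer_instance

-- ===== CLAIM (what is proved, stated in full; the proofs are below) =====
def Claim_equal_foo : Prop := ∀ (n : Int), Dom_foo n → Spec_foo n (foo n)

-- ===== LEMMAS AND PROOFS =====
-- the digit sum of a positive number is at least 1 (given enough fuel)
theorem fooDigits_sum_ge : ∀ (fuel : Nat) (t : Int) (arr : List Int),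
    t.toNat ≤ fuel → 0 < t → arr.sum + 1 ≤ (fooDigits fuel t arr).sum := by
  intro fuel
  induction fuel with
  | zero => intro t arr hle ht; omega
  | succ fuel ih =>
    intro t arr hle ht
    rw [fooDigits]
    simp only [ht, if_true]
    rw [PySem.Int.floordiv_eq_ediv_of_pos (by omega : (0:Int) < 10),
        PySem.Int.mod_eq_emod_of_pos (by omega : (0:Int) < 10)]
    by_cases hq : 0 < t / 10
    · have := ih (t / 10) (arr ++ [t % 10]) (by omega) hq
      simp only [List.sum_append, List.sum_cons, List.sum_nil] at this
      have hm : 0 ≤ t % 10 := by omega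
      omega
    · cases fuel with
      | zero =>
        rw [fooDigits]
        simp only [List.sum_append, List.sum_cons, List.sum_nil]
        omega
      | succ fuel =>
        rw [fooDigits]
        have : ¬ t / 10 > 0 := by omega
        simp only [this, if_false]
        simp only [List.sum_append, List.sum_cons, List.sum_nil]
        omega

theorem fooLoop_eq : ∀ (fuel : Nat) (n : Int), n.toNat ≤ fuel →
    fooLoop fuel n = (if n ≥ 100 then some "apple" else none) := by
  intro fuel
  induction fuel with
  | zero =>
    intro n hle
    have h100 : ¬ n ≥ 100 := by omega
    rw [fooLoop]
    simp [h100]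
  | succ fuel ih =>
    intro n hle
    rw [fooLoop]
    by_cases h : n ≥ 100
    · simp only [h, if_true]
      have hs := fooDigits_sum_ge n.toNat n [] (le_refl _) (by omega)
      simp only [List.sum_nil] at hs
      set s := (fooDigits n.toNat n []).sum with hsdef
      by_cases h1 : n - s = 99
      · simp [h1]
      · by_cases h2 : n - s ≤ 98
        · simp [h1, h2]
        · simp only [h1, if_false, h2, if_false]
          rw [ih (n - s) (by omega)]
          have : n - s ≥ 100 := by omega
          simp [this]
    · simp [h]

-- ===== VERDICT (by name: the statement is the Claim_ definition above) =====
theorem foo_spec : Claim_equal_foo := by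
  intro n _
  unfold Spec_foo foo_alt foo
  exact fooLoop_eq n.toNat n (le_refl _)
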